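-- pv_equiv track=rewrite | github.com/EmekaMomodu/Algorithms | Interviews/cisco/MaxNumOfDropPoints.py | max_num_of_drop_point
-- ===== SOURCE A (Python) =====
-- def max_num_of_drop_point(x_cords, y_cords):
--     x_counts = {}
--     y_counts = {}
--
--     for x_cord in x_cords: x_counts[x_cord] = x_counts.get(x_cord, 0) + 1
--     for y_cord in y_cords: y_counts[y_cord] = y_counts.get(y_cord, 0) + 1
--
--     max_drop_points = max(max(x_counts.values()), max(y_counts.values()))
--
--     if max_drop_points < 2: return 0
--     return max_drop_points
-- ===== SOURCE B (Python) =====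
-- def _longest_run(cords):
--     # sort a copy, then one pass recording the length of each run of equal values
--     runs = []
--     prev = None
--     for v in sorted(cords):
--         if runs and v == prev:
--             runs[-1] += 1
--         else:
--             runs.append(1)
--         prev = v
--     return max(runs)
--
--
-- def max_num_of_drop_point(x_cords, y_cords):
--     m = max(_longest_run(x_cords), _longest_run(y_cords))
--     return 0 if m < 2 else m
-- ===== Notes on version B (the rewrite author's own statement) =====
-- stated objective: alternative
-- what changed: Replaces hash-table frequency counting (dict of counts, max of values) with a sort-then-scan: sort each coordinate list, record the lengths of runs of equal values in one pass, and take the maximum run length.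
import Mathlib
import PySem

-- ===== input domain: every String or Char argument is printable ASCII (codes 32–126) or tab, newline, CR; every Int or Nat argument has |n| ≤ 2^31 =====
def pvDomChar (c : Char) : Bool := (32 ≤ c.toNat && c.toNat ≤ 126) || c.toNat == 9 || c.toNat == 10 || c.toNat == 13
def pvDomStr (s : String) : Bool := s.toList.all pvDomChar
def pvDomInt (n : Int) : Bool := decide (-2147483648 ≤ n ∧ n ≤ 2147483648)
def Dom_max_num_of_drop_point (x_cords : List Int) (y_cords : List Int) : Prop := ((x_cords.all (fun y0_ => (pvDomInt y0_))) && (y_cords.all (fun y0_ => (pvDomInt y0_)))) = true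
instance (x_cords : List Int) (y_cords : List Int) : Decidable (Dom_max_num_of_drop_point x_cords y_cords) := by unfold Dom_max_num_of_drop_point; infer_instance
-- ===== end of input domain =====

-- B replaces A's hash-table frequency counting with a sort-then-scan over run lengths (alternative decomposition, same results).


-- ===== PORT A =====
-- for cord in cords: counts[cord] = counts.get(cord, 0) + 1
def pvCountDict (cords : List Int) : PySem.Dict Int Int :=
  cords.foldl (fun d v => d.insert v (d.getD v 0 + 1)) PySem.Dict.empty

def max_num_of_drop_point (x_cords : List Int) (y_cords : List Int) : Int :=
  let x_counts := pvCountDict x_cords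
  let y_counts := pvCountDict y_cords
  -- max(values): ValueError on an empty dict; total form .getD 0 is only claimed under Pre_
  let mx := (PySem.List.max? x_counts.values (fun v => v)).getD 0
  let my := (PySem.List.max? y_counts.values (fun v => v)).getD 0
  let max_drop_points := max mx my
  if max_drop_points < 2 then 0 else max_drop_points

-- ===== PORT B =====
-- loop body of _longest_run: 'if runs and v == prev: runs[-1] += 1 else: runs.append(1); prev = v'
-- runs[-1] += 1 is ported by hand as dropLast ++ [last + 1]; exact here since this branch is guarded by runs ≠ []
def pvRunStep (st : List Int × Option Int) (v : Int) : List Int × Option Int :=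
  if st.1 ≠ [] ∧ some v = st.2 then
    (st.1.dropLast ++ [PySem.List.pyGetD st.1 (-1) 0 + 1], some v)
  else
    (st.1 ++ [1], some v)

def pvLongestRun (cords : List Int) : Int :=
  let st := (PySem.List.sorted cords (fun x => x) false).foldl pvRunStep ([], none)
  -- max(runs): ValueError on empty runs; total form .getD 0 is only claimed under Pre_
  (PySem.List.max? st.1 (fun r => r)).getD 0

def max_num_of_drop_point_alt (x_cords : List Int) (y_cords : List Int) : Int :=
  let m := max (pvLongestRun x_cords) (pvLongestRun y_cords)
  if m < 2 then 0 else m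

-- ===== PRECONDITION & SPEC =====
-- Pre_ excludes exactly the inputs where either coordinate list is empty: there Python A's max() raises ValueError (and so does B's).
def Pre_max_num_of_drop_point (x_cords : List Int) (y_cords : List Int) : Prop := x_cords ≠ [] ∧ y_cords ≠ []
instance (x_cords : List Int) (y_cords : List Int) : Decidable (Pre_max_num_of_drop_point x_cords y_cords) := by unfold Pre_max_num_of_drop_point; infer_instance

def pvWitness_max_num_of_drop_point : List Int × List Int := ([1, 2, 1], [3, 4])

def Spec_max_num_of_drop_point (x_cords : List Int) (y_cords : List Int) (out : Int) : Prop := out = max_num_of_drop_point_alt x_cords y_cords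
instance (x_cords : List Int) (y_cords : List Int) (out : Int) : Decidable (Spec_max_num_of_drop_point x_cords y_cords out) := by unfold Spec_max_num_of_drop_point; infer_instance

-- ===== CLAIM (what is proved, stated in full; the proofs are below) =====
def Claim_equal_max_num_of_drop_point : Prop := ∀ (x_cords : List Int) (y_cords : List Int), Dom_max_num_of_drop_point x_cords y_cords → Pre_max_num_of_drop_point x_cords y_cords → Spec_max_num_of_drop_point x_cords y_cords (max_num_of_drop_point x_cords y_cords)

-- ===== LEMMAS AND PROOFS =====

-- the runs list produced by B's loop from a given state
def pvRuns (st : List Int × Option Int) (l : List Int) : List Int := (l.foldl pvRunStep st).1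

lemma pvRunStep_fst_ne_nil (st : List Int × Option Int) (v : Int) : (pvRunStep st v).1 ≠ [] := by
  unfold pvRunStep; split_ifs <;> simp

lemma pvRunStep_append (runs0 l : List Int) (p : Option Int) (v : Int) (h : l ≠ []) :
    pvRunStep (runs0 ++ l, p) v = (runs0 ++ (pvRunStep (l, p) v).1, (pvRunStep (l, p) v).2) := by
  have hne : runs0 ++ l ≠ [] := by simp [h]
  unfold pvRunStep
  by_cases hc : some v = p
  · rw [if_pos ⟨hne, hc⟩, if_pos ⟨h, hc⟩]
    simp only
    rw [PySem.List.pyGetD_neg_one _ _ hne, PySem.List.pyGetD_neg_one _ _ h,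
        List.getLast_append_of_ne_nil hne h, List.dropLast_append_of_ne_nil h, List.append_assoc]
  · rw [if_neg (fun hx => hc hx.2), if_neg (fun hx => hc hx.2)]
    simp

-- a nonempty runs prefix passes through the loop untouched except at its tail
lemma pvRuns_prefix (t : List Int) : ∀ (runs0 l : List Int) (p : Option Int), l ≠ [] →
    pvRuns (runs0 ++ l, p) t = runs0 ++ pvRuns (l, p) t := by
  induction t with
  | nil => intro runs0 l p h; simp [pvRuns]
  | cons v t ih =>
    intro runs0 l p h
    simp only [pvRuns, List.foldl_cons]
    rw [pvRunStep_append runs0 l p v h]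
    have := ih runs0 (pvRunStep (l, p) v).1 (pvRunStep (l, p) v).2 (pvRunStep_fst_ne_nil _ _)
    simpa [pvRuns] using this

-- a run of equal values from a singleton state only bumps the counter
lemma pvRuns_replicate (k : Nat) : ∀ (c a : Int),
    (List.replicate k a).foldl pvRunStep ([c], some a) = ([c + k], some a) := by
  induction k with
  | zero => intro c a; simp
  | succ k ih =>
    intro c a
    rw [List.replicate_succ, List.foldl_cons]
    have hstep : pvRunStep ([c], some a) a = ([c + 1], some a) := by
      unfold pvRunStep
      rw [if_pos ⟨by simp, rfl⟩]
      simp [PySem.List.pyGetD_neg_one ([c]) 0 (by simp)]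
    have h2 : c + 1 + (k : Int) = c + ((k + 1 : Nat) : Int) := by push_cast; ring
    rw [hstep, ih, h2]

-- in a sorted list the leading value's occurrences form an initial run
lemma pvSortedSplit : ∀ (rest : List Int) (a : Int), (a :: rest).Pairwise (· ≤ ·) →
    ∃ (k : Nat) (t : List Int), a :: rest = List.replicate (k + 1) a ++ t ∧ a ∉ t ∧ t.Pairwise (· ≤ ·) := by
  intro rest
  induction rest with
  | nil => exact fun a _ => ⟨0, [], by simp, by simp, List.Pairwise.nil⟩
  | cons b rest ih =>
    intro a h
    by_cases hba : b = a
    · subst hba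
      obtain ⟨k, t, he, hat, hts⟩ := ih b (List.Pairwise.of_cons h)
      exact ⟨k + 1, t, by rw [List.replicate_succ, List.cons_append, ← he], hat, hts⟩
    · refine ⟨0, b :: rest, by simp, ?_, List.Pairwise.of_cons h⟩
      intro hmem
      rcases List.mem_cons.mp hmem with hab | har
      · exact hba hab.symm
      · have h1 : a ≤ b := (List.pairwise_cons.mp h).1 b (by simp)
        have h2 : b ≤ a := (List.pairwise_cons.mp (List.Pairwise.of_cons h)).1 a har
        exact hba (le_antisymm h2 h1)

lemma pvFoldlAdd_mem (k : Nat) : ∀ (s : List Int) (a : Int), a ∈ s →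
    (List.replicate k a).foldl PySem.Set.add s = s := by
  induction k with
  | zero => intro s a _; rfl
  | succ k ih =>
    intro s a ha
    rw [List.replicate_succ, List.foldl_cons, PySem.Set.add_of_mem ha]
    exact ih s a ha

lemma pvFoldlAdd_cons (t : List Int) : ∀ (s : List Int) (a : Int), a ∉ t →
    t.foldl PySem.Set.add (a :: s) = a :: t.foldl PySem.Set.add s := by
  induction t with
  | nil => intro s a _; rfl
  | cons x t ih =>
    intro s a ha
    have hxa : x ≠ a := fun h => ha (h ▸ List.mem_cons_self)
    have ha' : a ∉ t := fun h => ha (List.mem_cons_of_mem _ h)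
    rw [List.foldl_cons, List.foldl_cons]
    by_cases hxs : x ∈ s
    · rw [PySem.Set.add_of_mem hxs, PySem.Set.add_of_mem (List.mem_cons_of_mem _ hxs)]
      exact ih s a ha'
    · have hxs' : x ∉ a :: s := by simp [hxa, hxs]
      rw [PySem.Set.add_of_not_mem hxs', PySem.Set.add_of_not_mem hxs, List.cons_append]
      exact ih (s ++ [x]) a ha'

-- dedup of a leading run
lemma pvDedup_replicate_append (k : Nat) (a : Int) (t : List Int) (h : a ∉ t) :
    PySem.List.dedup (List.replicate (k + 1) a ++ t) = a :: PySem.List.dedup t := by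
  rw [PySem.List.dedup_eq_ofList, PySem.Set.ofList_eq_foldl, List.foldl_append,
      List.replicate_succ, List.foldl_cons]
  have h1 : PySem.Set.add ([] : List Int) a = [a] := PySem.Set.add_of_not_mem (by simp)
  rw [h1, pvFoldlAdd_mem k [a] a (by simp)]
  rw [show ([a] : List Int) = a :: [] from rfl, pvFoldlAdd_cons t [] a h]
  rw [PySem.List.dedup_eq_ofList, PySem.Set.ofList_eq_foldl]

-- MAIN: on a sorted list the runs produced by B's loop are exactly the
-- multiplicities of the distinct values, in order of first appearance
lemma pvRuns_sorted (s : List Int) (hs : s.Pairwise (· ≤ ·)) :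
    pvRuns ([], none) s = (PySem.List.dedup s).map (fun v => (s.count v : Int)) := by
  obtain ⟨n, hn⟩ : ∃ n, s.length ≤ n := ⟨s.length, le_rfl⟩
  induction n generalizing s with
  | zero =>
    have : s = [] := List.eq_nil_of_length_eq_zero (Nat.le_zero.mp hn)
    subst this; rfl
  | succ n ih =>
    cases s with
    | nil => rfl
    | cons a rest =>
      obtain ⟨k, t, he, hat, hts⟩ := pvSortedSplit rest a hs
      rw [he]
      have hstep0 : pvRunStep ([], none) a = ([1], some a) := by
        unfold pvRunStep; rw [if_neg (fun hx => hx.1 rfl)]; rfl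
      have hrep : (List.replicate (k + 1) a).foldl pvRunStep ([], none) = ([1 + (k : Int)], some a) := by
        rw [List.replicate_succ, List.foldl_cons, hstep0, pvRuns_replicate k 1 a]
      have hcount_rep : (List.replicate (k + 1) a).count a = k + 1 := List.count_replicate_self
      have hlen : t.length ≤ n := by
        have : (a :: rest).length = k + 1 + t.length := by rw [he]; simp
        simp only [List.length_cons] at hn this
        omega
      cases t with
      | nil =>
        rw [pvDedup_replicate_append k a [] (by simp)]
        simp only [pvRuns, List.append_nil, hrep, List.map_cons]
        simp [hcount_rep]
        ring
      | cons b t' =>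
        have hba : b ≠ a := fun hc => hat (hc ▸ List.mem_cons_self)
        have hstepb : pvRunStep ([1 + (k : Int)], some a) b = ([1 + (k : Int)] ++ [1], some b) := by
          unfold pvRunStep
          rw [if_neg (fun hx => hba (Option.some_injective _ hx.2))]
        have lhs1 : pvRuns ([], none) (List.replicate (k + 1) a ++ b :: t')
            = [1 + (k : Int)] ++ pvRuns ([1], some b) t' := by
          simp only [pvRuns, List.foldl_append, hrep, List.foldl_cons, hstepb]
          have := pvRuns_prefix t' [1 + (k : Int)] [1] (some b) (by simp)
          simpa [pvRuns] using this
        have lhs2 : pvRuns ([], none) (b :: t') = pvRuns ([1], some b) t' := by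
          have hstep0b : pvRunStep ([], none) b = ([1], some b) := by
            unfold pvRunStep; rw [if_neg (fun hx => hx.1 rfl)]; rfl
          simp only [pvRuns, List.foldl_cons, hstep0b]
        have hih := ih (b :: t') hts hlen
        rw [lhs1, ← lhs2, hih, pvDedup_replicate_append k a (b :: t') hat]
        rw [List.map_cons]
        have hca : ((List.replicate (k + 1) a ++ b :: t').count a : Int) = 1 + (k : Int) := by
          rw [List.count_append, hcount_rep, List.count_eq_zero.mpr hat]
          push_cast; ring
        rw [hca]
        simp only [List.cons_append, List.nil_append, List.cons.injEq, true_and]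
        apply List.map_congr_left
        intro v hv
        have hvt : v ∈ b :: t' := (PySem.List.mem_dedup _ _).mp hv
        have hva : v ≠ a := fun hc => hat (hc ▸ hvt)
        have hz : (List.replicate (k + 1) a).count v = 0 := List.count_eq_zero.mpr (by simp [hva])
        rw [List.count_append, hz]
        simp

-- the value of max() is invariant under permutation
lemma pvMax_perm (l l' : List Int) (h : l.Perm l') :
    PySem.List.max? l (fun r => r) = PySem.List.max? l' (fun r => r) := by
  cases hl : PySem.List.max? l (fun r => r) with
  | none =>
    rw [PySem.List.max?_eq_none_iff] at hl
    subst hl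
    rw [(PySem.List.max?_eq_none_iff _ _).mpr h.nil_eq.symm]
  | some m =>
    cases hl' : PySem.List.max? l' (fun r => r) with
    | none =>
      rw [PySem.List.max?_eq_none_iff] at hl'
      subst hl'
      have := PySem.List.max?_mem hl
      simp [h.mem_iff] at this
    | some m' =>
      have hm := PySem.List.max?_mem hl
      have hm' := PySem.List.max?_mem hl'
      have h1 : m ≤ m' := PySem.List.max?_isMax hl' m (h.mem_iff.mp hm)
      have h2 : m' ≤ m := PySem.List.max?_isMax hl m' (h.mem_iff.mpr hm')
      rw [le_antisymm h1 h2]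

-- per coordinate list: A's max dict value = B's longest run
lemma pvSide (cords : List Int) :
    (PySem.List.max? (pvCountDict cords).values (fun v => v)).getD 0 = pvLongestRun cords := by
  have hA : (pvCountDict cords).values = (PySem.Set.ofList cords).map (fun k => (cords.count k : Int)) := by
    unfold pvCountDict
    rw [PySem.Dict.foldl_insert_getD_add_one_eq_counter]
    show (PySem.Dict.counter cords).items.map (·.2) = _
    rw [PySem.Dict.items_counter, List.map_map]
    rfl
  have hsorted : (PySem.List.sorted cords (fun x => x) false).Pairwise (· ≤ ·) := by
    simpa using PySem.List.sorted_pairwise cords (fun x => x)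
  have hB : pvLongestRun cords
      = (PySem.List.max? ((PySem.List.dedup (PySem.List.sorted cords (fun x => x) false)).map
          (fun v => ((PySem.List.sorted cords (fun x => x) false).count v : Int))) (fun r => r)).getD 0 := by
    simp only [pvLongestRun]
    rw [show (List.foldl pvRunStep ([], none) (PySem.List.sorted cords (fun x => x) false)).1
        = pvRuns ([], none) (PySem.List.sorted cords (fun x => x) false) from rfl]
    rw [pvRuns_sorted _ hsorted]
  rw [hA, hB]
  congr 1
  apply pvMax_perm
  have hperm : (PySem.Set.ofList cords).Perm (PySem.List.dedup (PySem.List.sorted cords (fun x => x) false)) := by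
    apply (List.perm_ext_iff_of_nodup ?_ ?_).mpr
    · intro v
      rw [← PySem.List.dedup_eq_ofList, PySem.List.mem_dedup, PySem.List.mem_dedup,
          PySem.List.mem_sorted]
    · rw [← PySem.List.dedup_eq_ofList]; exact PySem.List.nodup_dedup cords
    · exact PySem.List.nodup_dedup _
  have hfun : ∀ v ∈ PySem.List.dedup (PySem.List.sorted cords (fun x => x) false),
      ((PySem.List.sorted cords (fun x => x) false).count v : Int) = (cords.count v : Int) := by
    intro v _
    rw [(PySem.List.sorted_perm cords _ false).count_eq v]
  calc ((PySem.Set.ofList cords).map (fun k => (cords.count k : Int))).Perm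
        ((PySem.List.dedup (PySem.List.sorted cords (fun x => x) false)).map (fun k => (cords.count k : Int))) := hperm.map _
    _ = _ := (List.map_congr_left (fun v hv => (hfun v hv).symm))

-- ===== VERDICT (by name: the statement is the Claim_ definition above) =====
theorem max_num_of_drop_point_spec : Claim_equal_max_num_of_drop_point := by
  intro x y _ _
  show max_num_of_drop_point x y = max_num_of_drop_point_alt x y
  simp only [max_num_of_drop_point, max_num_of_drop_point_alt, pvSide]
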